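-- pv_equiv track=rewrite | github.com/trialsignups41-cyber/SorceryWebApp | data_setup.py | get_preferred_slug
-- ===== SOURCE A (Python) =====
-- from typing import Dict, Any, List
--
-- STANDARD_FINISH_CODES = ['Standard', 's'] # Codes to prioritize for the IOU image
--
-- def get_preferred_slug(variants: List[Dict[str, Any]]) -> str | None:
--     """
--     Finds the slug for the 'Standard' finish variant, or defaults to the first slug found.
--     """
--     default_slug = None
--
--     # First, look for a variant that is explicitly 'Standard'
--     for variant in variants:
--         slug = variant.get('slug')
--         finish = variant.get('finish')
--
--         if not default_slug:
--             default_slug = slug # Keep the first one as a backup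
--
--         if finish in STANDARD_FINISH_CODES:
--             return slug # Found the preferred standard finish
--
--     return default_slug
-- ===== SOURCE B (Python) =====
-- STANDARD_FINISH_CODES = ['Standard', 's']
--
-- def get_preferred_slug(variants):
--     # Pass 1: the slug of the first variant with a Standard finish.
--     for variant in variants:
--         if variant.get('finish') in STANDARD_FINISH_CODES:
--             return variant.get('slug')
--     # Pass 2: otherwise the first non-empty slug, if any.
--     return next((v.get('slug') for v in variants if v.get('slug')), None)
-- ===== Notes on version B (the rewrite author's own statement) =====
-- stated objective: alternative
-- what changed: Replaced the single loop that interleaves backup tracking with the Standard search by two independent passes: a plain loop returning the first Standard-finish variant's slug, else a generator pass returning the first non-empty slug or None.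
-- intended difference: On inputs with no Standard-finish variant where every slug is falsy and the last variant's slug is the empty string, A returns '' (leftover backup state from its 'if not default_slug' overwriting), while B returns None, the intended 'no usable slug' answer for a str|None function. — e.g. on get_preferred_slug([[("slug", some "")]]): A returns some "", B returns none
import Mathlib
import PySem

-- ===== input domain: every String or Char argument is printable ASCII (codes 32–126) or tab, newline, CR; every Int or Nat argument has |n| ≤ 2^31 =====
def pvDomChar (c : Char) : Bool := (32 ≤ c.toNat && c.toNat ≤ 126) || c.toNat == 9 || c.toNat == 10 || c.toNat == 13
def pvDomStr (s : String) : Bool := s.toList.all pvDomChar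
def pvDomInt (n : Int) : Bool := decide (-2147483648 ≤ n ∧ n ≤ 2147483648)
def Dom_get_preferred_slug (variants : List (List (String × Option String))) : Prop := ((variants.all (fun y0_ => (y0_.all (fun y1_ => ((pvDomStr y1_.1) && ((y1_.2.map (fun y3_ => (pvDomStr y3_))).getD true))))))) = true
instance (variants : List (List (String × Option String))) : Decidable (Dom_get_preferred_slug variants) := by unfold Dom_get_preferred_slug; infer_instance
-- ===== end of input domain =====

-- B replaces A's single loop (interleaving backup tracking with the Standard search) by two
-- independent passes ("alternative"); on the all-falsy-slug corner described at D_ below, B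
-- returns None where A returns the last variant's empty-string slug.


-- ===== PORT A =====
-- variant.get(key): dict lookup with default None (value type is already Option String)
def pvGet (v : List (String × Option String)) (k : String) : Option String :=
  PySem.Dict.getD (PySem.Dict.mk v) k none

-- Python truthiness of a str-or-None value: None and "" are falsy
def pvTruthy : Option String → Bool
  | none => false
  | some s => !(s == "")

-- the for-loop of A, carrying default_slug
def pvGoA (variants : List (List (String × Option String))) (default_slug : Option String) :
    Option String :=
  match variants with
  | [] => default_slug
  | v :: rest =>
    let slug := pvGet v "slug"
    let finish := pvGet v "finish"
    let default' := if pvTruthy default_slug then default_slug else slug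
    if finish = some "Standard" ∨ finish = some "s" then slug
    else pvGoA rest default'

def get_preferred_slug (variants : List (List (String × Option String))) : Option String :=
  pvGoA variants none

-- ===== PORT B =====
-- v.get('finish') in STANDARD_FINISH_CODES
def pvIsStd (v : List (String × Option String)) : Bool :=
  let f := pvGet v "finish"
  f == some "Standard" || f == some "s"

-- pass 1: first Standard-finish variant's slug; pass 2: first truthy slug, else None
def get_preferred_slug_alt (variants : List (List (String × Option String))) : Option String :=
  match variants.find? pvIsStd with
  | some v => pvGet v "slug"
  | none =>
    match variants.findSome?
        (fun v => let s := pvGet v "slug"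
                  if pvTruthy s then some s else none) with
    | some s => s
    | none => none

-- ===== PRECONDITION & SPEC =====
-- On inputs with no Standard-finish variant where every slug is falsy and the last variant's
-- slug is the empty string, A returns "" (leftover backup state from its 'if not default_slug'
-- overwriting), while B returns None, the intended 'no usable slug' answer.
def D_get_preferred_slug (variants : List (List (String × Option String))) : Prop :=
  (∀ v ∈ variants, pvGet v "finish" ∉ [some "Standard", some "s"] ∧ pvTruthy (pvGet v "slug") = false) ∧
  (variants.getLast?.map (fun v => pvGet v "slug")).getD none = some ""
instance (variants : List (List (String × Option String))) : Decidable (D_get_preferred_slug variants) := by unfold D_get_preferred_slug; infer_instance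

def Spec_get_preferred_slug (variants : List (List (String × Option String))) (out : Option String) : Prop := ¬ D_get_preferred_slug variants → out = get_preferred_slug_alt variants
instance (variants : List (List (String × Option String))) (out : Option String) : Decidable (Spec_get_preferred_slug variants out) := by unfold Spec_get_preferred_slug; infer_instance

def pvDiffWitness_get_preferred_slug : (List (List (String × Option String))) := [[("slug", some "")]]
def pvDiffWitnessOut_get_preferred_slug : (Option String) × (Option String) := (some "", none)

-- ===== CLAIM (what is proved, stated in full; the proofs are below) =====
def Claim_unchanged_get_preferred_slug : Prop := ∀ (variants : List (List (String × Option String))), Dom_get_preferred_slug variants → Spec_get_preferred_slug variants (get_preferred_slug variants)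
def Claim_changed_get_preferred_slug : Prop := Dom_get_preferred_slug (pvDiffWitness_get_preferred_slug) ∧ D_get_preferred_slug (pvDiffWitness_get_preferred_slug) ∧ get_preferred_slug (pvDiffWitness_get_preferred_slug) = pvDiffWitnessOut_get_preferred_slug.1 ∧ get_preferred_slug_alt (pvDiffWitness_get_preferred_slug) = pvDiffWitnessOut_get_preferred_slug.2 ∧ pvDiffWitnessOut_get_preferred_slug.1 ≠ pvDiffWitnessOut_get_preferred_slug.2
def Claim_exact_get_preferred_slug : Prop := ∀ (variants : List (List (String × Option String))), Dom_get_preferred_slug variants → D_get_preferred_slug variants → get_preferred_slug variants ≠ get_preferred_slug_alt variants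

-- ===== LEMMAS AND PROOFS =====

-- the loop of A, characterised: standard hit wins; else current default if truthy;
-- else first truthy slug in the rest; else last slug of the rest; else the (falsy) default
def pvASpec (variants : List (List (String × Option String))) (d : Option String) :
    Option String :=
  match variants.find? pvIsStd with
  | some v => pvGet v "slug"
  | none =>
    if pvTruthy d then d
    else
      match variants.findSome?
          (fun v => let s := pvGet v "slug"
                    if pvTruthy s then some s else none) with
      | some s => s
      | none =>
        match variants.getLast? with
        | some v => pvGet v "slug"
        | none => d

lemma pvGoA_eq (variants : List (List (String × Option String))) :
    ∀ d, pvGoA variants d = pvASpec variants d := by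
  induction variants with
  | nil => intro d; simp [pvGoA, pvASpec]
  | cons v rest ih =>
    intro d
    simp only [pvGoA, pvASpec, List.find?_cons, List.findSome?_cons]
    by_cases hstd : pvGet v "finish" = some "Standard" ∨
        pvGet v "finish" = some "s"
    · have : pvIsStd v = true := by
        simp [pvIsStd]; rcases hstd with h | h <;> simp [h]
      simp [hstd, this]
    · have hstd' : pvIsStd v = false := by
        simp [pvIsStd]
        constructor <;> (intro h; exact hstd (by simp [h]))
      simp only [hstd', if_neg hstd]
      rw [ih, pvASpec]
      cases hfind : rest.find? pvIsStd with
      | some w => simp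
      | none =>
        simp only
        by_cases hd : pvTruthy d = true
        · simp [hd]
        · simp only [Bool.not_eq_true] at hd
          simp only [hd, Bool.false_eq_true, if_false]
          by_cases hs : pvTruthy (pvGet v "slug") = true
          · simp [hs]
          · simp only [Bool.not_eq_true] at hs
            simp only [hs, Bool.false_eq_true, if_false]
            cases rest.findSome?
              (fun v => let s := pvGet v "slug"
                        if pvTruthy s then some s else none) with
            | some s => simp
            | none =>
              cases rest with
              | nil => simp
              | cons a l =>
                simp only [List.getLast?_cons_cons]
                cases h : (a :: l).getLast? with
                | some w => simp
                | none => simp [List.getLast?_eq_none_iff] at h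

-- findSome? over the truthy-slug selector is none iff every slug is falsy
lemma pvFindSome_none_iff (variants : List (List (String × Option String))) :
    variants.findSome?
        (fun v => let s := pvGet v "slug"
                  if pvTruthy s then some s else none) = none ↔
    variants.all (fun v => !pvTruthy (pvGet v "slug")) = true := by
  rw [List.findSome?_eq_none_iff, List.all_eq_true]
  constructor
  · intro h v hv
    have := h v hv
    by_cases hs : pvTruthy (pvGet v "slug") = true
    · simp [hs] at this
    · simpa using hs
  · intro h v hv
    have := h v hv
    simp only [Bool.not_eq_true'] at this
    simp [this]

-- D_'s first conjunct, as the two facts the ports' shapes use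
lemma pvD1_iff (variants : List (List (String × Option String))) :
    (∀ v ∈ variants, pvGet v "finish" ∉ [some "Standard", some "s"] ∧
        pvTruthy (pvGet v "slug") = false) ↔
    (variants.find? pvIsStd = none ∧
     variants.all (fun v => !pvTruthy (pvGet v "slug")) = true) := by
  rw [List.find?_eq_none, List.all_eq_true]
  constructor
  · intro h
    refine ⟨fun v hv => ?_, fun v hv => ?_⟩
    · have := (h v hv).1
      simp only [List.mem_cons, List.not_mem_nil, or_false, not_or] at this
      simp [pvIsStd, this.1, this.2]
    · simp [(h v hv).2]
  · rintro ⟨h1, h2⟩ v hv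
    have hf := h1 v hv
    simp only [pvIsStd, Bool.or_eq_true, beq_iff_eq] at hf
    have hs := h2 v hv
    simp only [Bool.not_eq_true'] at hs
    constructor
    · simp only [List.mem_cons, List.not_mem_nil, or_false, not_or]
      constructor <;> (intro he; apply hf; simp [he])
    · exact hs

-- ===== VERDICT (by name: the statement is the Claim_ definition above) =====
theorem get_preferred_slug_spec : Claim_unchanged_get_preferred_slug := by
  intro variants _ hnd
  unfold get_preferred_slug get_preferred_slug_alt
  rw [pvGoA_eq]
  unfold pvASpec
  cases hfind : variants.find? pvIsStd with
  | some v => rfl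
  | none =>
    simp only [show pvTruthy none = false from rfl, Bool.false_eq_true, if_false]
    cases hfs : variants.findSome?
        (fun v => let s := pvGet v "slug"
                  if pvTruthy s then some s else none) with
    | some s => rfl
    | none =>
      have hall := (pvFindSome_none_iff variants).mp hfs
      cases hlast : variants.getLast? with
      | none => rfl
      | some w =>
        have hw : w ∈ variants := List.mem_of_getLast? hlast
        have hwf : pvTruthy (pvGet w "slug") = false := by
          have := List.all_eq_true.mp hall w hw
          simpa using this
        cases hws : pvGet w "slug" with
        | none => simp [hws]
        | some t =>
          have ht : t = "" := by
            simp [pvTruthy, hws] at hwf; exact hwf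
          exfalso
          exact hnd ⟨(pvD1_iff variants).mpr ⟨hfind, hall⟩, by simp [hlast, hws, ht]⟩

theorem get_preferred_slug_tight : Claim_exact_get_preferred_slug := by
  intro variants _ hd
  obtain ⟨h1, hlast⟩ := hd
  obtain ⟨hfind, hall⟩ := (pvD1_iff variants).mp h1
  have hfs : variants.findSome?
      (fun v => let s := pvGet v "slug"
                if pvTruthy s then some s else none) = none :=
    (pvFindSome_none_iff variants).mpr hall
  unfold get_preferred_slug get_preferred_slug_alt
  rw [pvGoA_eq]
  unfold pvASpec
  rw [hfind]
  simp only [show pvTruthy none = false from rfl, Bool.false_eq_true, if_false]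
  rw [hfs]
  cases hl : variants.getLast? with
  | none => simp [hl] at hlast
  | some w =>
    simp only [hl, Option.map_some, Option.getD_some] at hlast
    simp [hlast]

theorem get_preferred_slug_changed : Claim_changed_get_preferred_slug := by
  unfold Claim_changed_get_preferred_slug; decide
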